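-- pv_equiv track=rewrite | github.com/rlagksql219/algorithm-study | 오주영/Week6/3문제/BOJ_2615_오목.py | find_c
-- ===== SOURCE A (Python) =====
-- def find_c(list):
--     for i,line in enumerate(list):
--         # if line.find('11111') != line.find('22222'):    #둘 다 오목인 경우 제외 //이거도 필요 없었다.
--             if line.find('11111')!=-1:
--                 if line.find('111111')==-1:         #육목 제외
--                     return (1,i,line.find('11111'))
--             if line.find('22222')!=-1:
--                 if line.find('222222')==-1:
--                     return (2,i,line.find('22222'))
-- ===== SOURCE B (Python) =====
-- def _scan(line, ch):
--     """One left-to-right pass: (longest run of ch, start of the first run that reaches length 5)."""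
--     run = 0
--     best = 0
--     hit = None
--     for j, x in enumerate(line):
--         if x == ch:
--             run += 1
--             if run > best:
--                 best = run
--             if run == 5 and hit is None:
--                 hit = j - 4
--         else:
--             run = 0
--     return best, hit
--
--
-- def find_c(list):
--     for i, line in enumerate(list):
--         for d, ch in ((1, '1'), (2, '2')):
--             best, hit = _scan(line, ch)
--             if best == 5:
--                 return (d, i, hit)
-- ===== Notes on version B (the rewrite author's own statement) =====
-- stated objective: alternative
-- what changed: Replaces the three str.find substring searches per digit with a single explicit run-length counting pass per line that tracks the maximum run and the start of the first run reaching length 5, deciding 'exactly 5' as max-run == 5.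
import Mathlib
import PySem

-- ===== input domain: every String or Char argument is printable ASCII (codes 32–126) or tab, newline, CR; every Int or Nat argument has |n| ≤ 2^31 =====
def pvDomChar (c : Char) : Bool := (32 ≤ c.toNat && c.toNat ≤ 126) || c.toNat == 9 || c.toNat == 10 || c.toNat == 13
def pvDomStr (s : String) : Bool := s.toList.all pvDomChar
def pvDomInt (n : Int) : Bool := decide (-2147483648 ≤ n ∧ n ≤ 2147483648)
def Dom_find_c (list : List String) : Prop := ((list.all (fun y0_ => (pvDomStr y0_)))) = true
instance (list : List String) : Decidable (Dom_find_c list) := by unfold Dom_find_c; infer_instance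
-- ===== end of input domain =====

-- B replaces A's per-digit substring searches ('11111'/'111111' via str.find) by one explicit
-- run-length counting pass per line (alternative decomposition, same asymptotic cost).

-- ===== PORT A =====
def find_c_go (lines : List String) (i : Int) : Option (Int × Int × Int) :=
  match lines with
  | [] => none
  | line :: rest =>
    if PySem.Str.find line "11111" ≠ -1 ∧ PySem.Str.find line "111111" = -1 then
      some (1, i, PySem.Str.find line "11111")
    else if PySem.Str.find line "22222" ≠ -1 ∧ PySem.Str.find line "222222" = -1 then
      some (2, i, PySem.Str.find line "22222")
    else find_c_go rest (i + 1)

def find_c (list : List String) : Option (Int × Int × Int) := find_c_go list 0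

-- ===== PORT B =====
-- _scan of Source B: one pass, j = current index, run = current run of c, best = longest run so far,
-- hit = start of the first run that reached length 5.
def scanRun (c : Char) (cs : List Char) (j run best : Int) (hit : Option Int) : Int × Option Int :=
  match cs with
  | [] => (best, hit)
  | x :: rest =>
    if x == c then
      let run' := run + 1
      let best' := if run' > best then run' else best
      let hit' := if run' == 5 && hit.isNone then some (j - 4) else hit
      scanRun c rest (j + 1) run' best' hit'
    else
      scanRun c rest (j + 1) 0 best hit

-- the inner 'for d, ch in ((1,'1'),(2,'2'))' loop of Source B
-- (hit.getD 0: when best = 5 the scan has always set hit, proved below; Python returns hit itself)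
def altDigits (digits : List (Int × Char)) (cs : List Char) (i : Int) : Option (Int × Int × Int) :=
  match digits with
  | [] => none
  | (d, ch) :: rest =>
    let r := scanRun ch cs 0 0 0 none
    if r.1 == 5 then some (d, i, (r.2).getD 0) else altDigits rest cs i

def find_c_alt_go (lines : List String) (i : Int) : Option (Int × Int × Int) :=
  match lines with
  | [] => none
  | line :: rest =>
    match altDigits [(1, '1'), (2, '2')] line.toList i with
    | some r => some r
    | none => find_c_alt_go rest (i + 1)

def find_c_alt (list : List String) : Option (Int × Int × Int) := find_c_alt_go list 0

-- ===== PRECONDITION & SPEC =====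
def Spec_find_c (list : List String) (out : Option (Int × Int × Int)) : Prop := out = find_c_alt list
instance (list : List String) (out : Option (Int × Int × Int)) : Decidable (Spec_find_c list out) := by unfold Spec_find_c; infer_instance

-- ===== CLAIM (what is proved, stated in full; the proofs are below) =====
def Claim_equal_find_c : Prop := ∀ (list : List String), Dom_find_c list → Spec_find_c list (find_c list)

-- ===== LEMMAS AND PROOFS =====

-- length of the run of c at the head of cs
def leadRun (c : Char) : List Char → Nat
  | [] => 0
  | x :: r => if x = c then leadRun c r + 1 else 0

-- longest run of c in cs, with an incoming run of length `run`
def maxRunFrom (c : Char) (run : Int) : List Char → Int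
  | [] => run
  | x :: r => if x = c then maxRunFrom c (run + 1) r else max run (maxRunFrom c 0 r)

-- start index of the first length-5 window of c's
def firstOcc (c : Char) : List Char → Option Nat
  | [] => none
  | x :: r => if List.replicate 5 c <+: (x :: r) then some 0 else (firstOcc c r).map (· + 1)

-- relative index at which the running count first reaches 5
def firstFire (c : Char) (run : Int) : List Char → Option Nat
  | [] => none
  | x :: r =>
    if x = c then (if run + 1 = 5 then some 0 else (firstFire c (run + 1) r).map (· + 1))
    else (firstFire c 0 r).map (· + 1)

lemma replicate_prefix_iff_lead (c : Char) : ∀ (k : Nat) (cs : List Char),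
    List.replicate k c <+: cs ↔ k ≤ leadRun c cs := by
  intro k
  induction k with
  | zero => intro cs; simp
  | succ k ih =>
    intro cs
    cases cs with
    | nil =>
      simp only [leadRun]
      constructor
      · intro h; have := h.length_le; simp at this
      · intro h; exact absurd h (by omega)
    | cons x r =>
      rw [List.replicate_succ, List.cons_prefix_cons]
      by_cases hx : x = c
      · subst hx
        simp [leadRun, ih r]
      · simp only [leadRun, if_neg hx]
        constructor
        · rintro ⟨h, -⟩; exact absurd h.symm hx
        · intro h; exact absurd h (by omega)

lemma le_maxRunFrom (c : Char) : ∀ (cs : List Char) (run : Int), run ≤ maxRunFrom c run cs := by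
  intro cs
  induction cs with
  | nil => intro run; simp [maxRunFrom]
  | cons x r ih =>
    intro run
    by_cases hx : x = c
    · simp only [maxRunFrom, if_pos hx]
      have := ih (run + 1)
      omega
    · simp only [maxRunFrom, if_neg hx]
      exact le_max_left _ _

lemma maxRunFrom_ge_iff (c : Char) (k : Nat) (hk : 0 < k) : ∀ (cs : List Char) (run : Int),
    0 ≤ run →
    ((k : Int) ≤ maxRunFrom c run cs ↔
      (k : Int) ≤ run + leadRun c cs ∨ ∃ j, k ≤ leadRun c (cs.drop j)) := by
  intro cs
  induction cs with
  | nil =>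
    intro run _
    simp only [maxRunFrom, leadRun, List.drop_nil]
    constructor
    · intro h; left; omega
    · rintro (h | ⟨j, hj⟩) <;> omega
  | cons x r ih =>
    intro run hrun
    by_cases hx : x = c
    · simp only [maxRunFrom, leadRun, if_pos hx]
      rw [ih (run + 1) (by omega)]
      constructor
      · rintro (h | ⟨j, hj⟩)
        · left; push_cast at h ⊢; omega
        · right; exact ⟨j + 1, by simpa using hj⟩
      · rintro (h | ⟨j, hj⟩)
        · left; push_cast at h ⊢; omega
        · cases j with
          | zero =>
            left
            simp only [List.drop_zero, leadRun, if_pos hx] at hj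
            omega
          | succ j => right; exact ⟨j, by simpa using hj⟩
    · simp only [maxRunFrom, leadRun, if_neg hx, le_max_iff]
      rw [ih 0 le_rfl]
      constructor
      · rintro (h | h | ⟨j, hj⟩)
        · left; omega
        · right
          refine ⟨1, ?_⟩
          simp only [List.drop_succ_cons, List.drop_zero]
          omega
        · right; exact ⟨j + 1, by simpa using hj⟩
      · rintro (h | ⟨j, hj⟩)
        · left; omega
        · cases j with
          | zero =>
            simp only [List.drop_zero, leadRun, if_neg hx] at hj
            omega
          | succ j =>
            right; right; exact ⟨j, by simpa using hj⟩

lemma infix_iff_maxRun (c : Char) (k : Nat) (hk : 0 < k) (cs : List Char) :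
    List.replicate k c <:+: cs ↔ (k : Int) ≤ maxRunFrom c 0 cs := by
  rw [← PySem.Chars.isIn_iff_infix, ← PySem.Chars.exists_prefix_drop_iff_isIn,
    maxRunFrom_ge_iff c k hk cs 0 le_rfl]
  constructor
  · rintro ⟨j, hj⟩
    right
    exact ⟨j, (replicate_prefix_iff_lead c k _).1 hj⟩
  · rintro (h | ⟨j, hj⟩)
    · exact ⟨0, (replicate_prefix_iff_lead c k _).2 (by simpa using by omega)⟩
    · exact ⟨j, (replicate_prefix_iff_lead c k _).2 hj⟩

lemma firstOcc_eq_none (c : Char) : ∀ (cs : List Char),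
    (∀ j, ¬ (List.replicate 5 c <+: cs.drop j)) → firstOcc c cs = none := by
  intro cs
  induction cs with
  | nil => intro _; rfl
  | cons x r ih =>
    intro h
    have h0 := h 0
    simp only [List.drop_zero] at h0
    simp only [firstOcc, if_neg h0, Option.map_eq_none_iff]
    exact ih (fun j => by simpa using h (j + 1))

lemma firstOcc_none (c : Char) : ∀ (cs : List Char), firstOcc c cs = none →
    ∀ j, ¬ (List.replicate 5 c <+: cs.drop j) := by
  intro cs
  induction cs with
  | nil =>
    intro _ j h
    have := h.length_le
    simp at this
  | cons x r ih =>
    intro h j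
    simp only [firstOcc] at h
    split_ifs at h with hp
    rw [Option.map_eq_none_iff] at h
    cases j with
    | zero => simpa using hp
    | succ j => simpa using ih h j

lemma firstOcc_some (c : Char) : ∀ (cs : List Char) (p : Nat), firstOcc c cs = some p →
    (List.replicate 5 c <+: cs.drop p) ∧ ∀ q < p, ¬ (List.replicate 5 c <+: cs.drop q) := by
  intro cs
  induction cs with
  | nil => intro p h; simp [firstOcc] at h
  | cons x r ih =>
    intro p h
    simp only [firstOcc] at h
    split_ifs at h with hp
    · obtain rfl : p = 0 := by simpa using h.symm
      exact ⟨by simpa using hp, by omega⟩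
    · simp only [Option.map_eq_some_iff] at h
      obtain ⟨p', hp', rfl⟩ := h
      obtain ⟨h1, h2⟩ := ih p' hp'
      refine ⟨by simpa using h1, ?_⟩
      intro q hq
      cases q with
      | zero => simpa using hp
      | succ q => simpa using h2 q (by omega)

lemma find_eq_firstOcc (c : Char) (cs : List Char) :
    PySem.Chars.find cs (List.replicate 5 c) = (firstOcc c cs).elim (-1) (fun p => (p : Int)) := by
  cases hfo : firstOcc c cs with
  | none =>
    simp only [Option.elim]
    rw [PySem.Chars.find_eq_neg_one_iff, ← PySem.Chars.isIn_iff_infix,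
      ← PySem.Chars.exists_prefix_drop_iff_isIn]
    rintro ⟨j, hj⟩
    exact firstOcc_none c cs hfo j hj
  | some p =>
    obtain ⟨h1, h2⟩ := firstOcc_some c cs p hfo
    have hinf : List.replicate 5 c <:+: cs := by
      rw [← PySem.Chars.isIn_iff_infix, ← PySem.Chars.exists_prefix_drop_iff_isIn]
      exact ⟨p, h1⟩
    have hnn : 0 ≤ PySem.Chars.find cs (List.replicate 5 c) :=
      (PySem.Chars.find_nonneg_iff cs _).2 hinf
    obtain ⟨hf1, hf2⟩ := PySem.Chars.find_spec hnn
    have hpt : (PySem.Chars.find cs (List.replicate 5 c)).toNat = p := by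
      by_contra hne
      rcases Nat.lt_or_ge (PySem.Chars.find cs (List.replicate 5 c)).toNat p with h | h
      · exact h2 _ h hf1
      · exact hf2 p (by omega) h1
    simp only [Option.elim]
    omega

lemma scanRun_eq (c : Char) : ∀ (cs : List Char) (j run best : Int) (hit : Option Int),
    0 ≤ run → run ≤ best →
    scanRun c cs j run best hit =
      (max best (maxRunFrom c run cs),
       hit.or ((firstFire c run cs).map (fun (t : Nat) => j + (t : Int) + 1 - 5))) := by
  intro cs
  induction cs with
  | nil =>
    intro j run best hit _ hrb
    simp only [scanRun, maxRunFrom, firstFire, Option.map_none, Option.or_none]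
    congr 1
    rw [max_eq_left hrb]
  | cons x r ih =>
    intro j run best hit hrun hrb
    by_cases hx : x = c
    · have hbeq : (x == c) = true := by simp [hx]
      simp only [scanRun, hbeq, if_true, maxRunFrom, firstFire, if_pos hx]
      have hM := le_maxRunFrom c r (run + 1)
      by_cases h5 : run + 1 = 5
      · have hc : (if ((run + 1 == 5) && hit.isNone) = true then some (j - 4) else hit) =
            hit.or (some (j - 4)) := by
          cases hit <;> simp [h5]
        rw [hc, ih (j + 1) (run + 1) (if run + 1 > best then run + 1 else best)
          (hit.or (some (j - 4))) (by omega) (by split_ifs <;> omega), if_pos h5]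
        congr 1
        · split_ifs with hgt
          · rw [max_eq_right hM, max_eq_right ((le_of_lt hgt).trans hM)]
          · rfl
        · rw [Option.or_assoc]
          congr 1
          simp only [Option.some_or, Option.map_some]
          congr 1
          push_cast
          omega
      · have hc : (if ((run + 1 == 5) && hit.isNone) = true then some (j - 4) else hit) =
            hit := by
          simp [h5]
        rw [hc, ih (j + 1) (run + 1) (if run + 1 > best then run + 1 else best) hit
          (by omega) (by split_ifs <;> omega), if_neg h5]
        congr 1
        · split_ifs with hgt
          · rw [max_eq_right hM, max_eq_right ((le_of_lt hgt).trans hM)]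
          · rfl
        · cases hit with
          | some h => simp
          | none =>
            simp only [Option.none_or, Option.map_map]
            congr 1
            funext t
            simp only [Function.comp]
            push_cast
            omega
    · have hbeq : (x == c) = false := by simp [hx]
      simp only [scanRun, hbeq, Bool.false_eq_true, if_false, maxRunFrom, firstFire, if_neg hx]
      rw [ih (j + 1) 0 best hit le_rfl (by omega)]
      congr 1
      · rw [max_comm run (maxRunFrom c 0 r), ← max_assoc,
          max_eq_left (hrb.trans (le_max_left best (maxRunFrom c 0 r)))]
      · cases hit with
        | some h => simp
        | none =>
          simp only [Option.none_or, Option.map_map]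
          congr 1
          funext t
          simp only [Function.comp]
          push_cast
          omega

lemma firstFire_pad (c : Char) : ∀ (m : Nat) (k : Int), 0 ≤ k → k + m ≤ 4 →
    ∀ (cs : List Char),
    firstFire c k (List.replicate m c ++ cs) = (firstFire c (k + m) cs).map (· + m) := by
  intro m
  induction m with
  | zero =>
    intro k _ _ cs
    simp
  | succ m ih =>
    intro k hk hkm cs
    rw [List.replicate_succ, List.cons_append]
    simp only [firstFire, if_true]
    rw [if_neg (by push_cast at hkm; omega)]
    rw [ih (k + 1) (by omega) (by push_cast at hkm ⊢; omega) cs]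
    have : k + 1 + (m : Int) = k + ((m : Nat) + 1 : Nat) := by push_cast; ring
    rw [this, Option.map_map]
    congr 1

lemma leadRun_replicate_append (c x : Char) (hx : x ≠ c) : ∀ (m : Nat) (t : List Char),
    leadRun c (List.replicate m c ++ x :: t) = m := by
  intro m
  induction m with
  | zero => intro t; simp [leadRun, hx]
  | succ m ih => intro t; rw [List.replicate_succ, List.cons_append]; simp [leadRun, ih]

lemma firstOcc_shift (c x : Char) (hx : x ≠ c) : ∀ (m : Nat), m < 5 → ∀ (r : List Char),
    firstOcc c (List.replicate m c ++ x :: r) = (firstOcc c r).map (· + (m + 1)) := by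
  intro m
  induction m with
  | zero =>
    intro _ r
    have hnp : ¬ (List.replicate 5 c <+: x :: r) := by
      rw [replicate_prefix_iff_lead]
      simp [leadRun, hx]
    simp only [List.replicate_zero, List.nil_append, firstOcc]
    rw [if_neg hnp]
  | succ m ih =>
    intro hm r
    rw [List.replicate_succ, List.cons_append]
    have hnp : ¬ (List.replicate 5 c <+: c :: (List.replicate m c ++ x :: r)) := by
      rw [replicate_prefix_iff_lead]
      simp only [leadRun, if_true, leadRun_replicate_append c x hx]
      omega
    simp only [firstOcc]
    rw [if_neg hnp]
    rw [ih (by omega) r, Option.map_map]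
    congr 1

lemma lead_decomp (c : Char) : ∀ (cs : List Char), ∃ rest,
    cs = List.replicate (leadRun c cs) c ++ rest ∧
      (rest = [] ∨ ∃ x r, rest = x :: r ∧ x ≠ c) := by
  intro cs
  induction cs with
  | nil => exact ⟨[], by simp [leadRun]⟩
  | cons x r ih =>
    by_cases hx : x = c
    · obtain ⟨rest, h1, h2⟩ := ih
      subst hx
      refine ⟨rest, ?_, h2⟩
      simp only [leadRun]
      exact congrArg _ h1
    · exact ⟨x :: r, by simp [leadRun, hx], Or.inr ⟨x, r, rfl, hx⟩⟩

lemma firstFire_eq_firstOcc (c : Char) (cs : List Char) :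
    firstFire c 0 cs = (firstOcc c cs).map (· + 4) := by
  have key : ∀ (n : Nat) (cs : List Char), cs.length ≤ n →
      firstFire c 0 cs = (firstOcc c cs).map (· + 4) := by
    intro n
    induction n with
    | zero =>
      intro cs hl
      obtain rfl : cs = [] := List.eq_nil_of_length_eq_zero (by omega)
      rfl
    | succ n ih =>
      intro cs hl
      by_cases h5 : 5 ≤ leadRun c cs
      · -- a run of length ≥ 5 starts at the head
        obtain ⟨t, ht⟩ := (replicate_prefix_iff_lead c 5 cs).2 h5
        subst ht
        have hp : List.replicate 5 c <+: List.replicate 5 c ++ t := List.prefix_append _ _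
        simp only [firstOcc, show (List.replicate 5 c ++ t : List Char) =
          c :: c :: c :: c :: c :: t from rfl] at *
        rw [if_pos (show List.replicate 5 c <+: c :: c :: c :: c :: c :: t from hp)]
        simp only [firstFire, if_true]
        norm_num
      · rw [not_le] at h5
        obtain ⟨rest, hdec, hrest⟩ := lead_decomp c cs
        set L := leadRun c cs with hL
        rcases hrest with rfl | ⟨x, r', rfl, hx⟩
        · -- cs is one short run of c's: no window of 5
          rw [hdec]
          have hpad := firstFire_pad c L 0 (by omega) (by omega) []
          simp only [zero_add] at hpad
          rw [hpad]
          simp only [firstFire, Option.map_none]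
          have : firstOcc c (List.replicate L c ++ []) = none := by
            apply firstOcc_eq_none
            intro j h
            have h1 := h.length_le
            simp only [List.length_drop, List.length_append, List.length_replicate,
              List.length_nil] at h1
            omega
          rw [this]
          rfl
        · -- a short run, a non-c char, then the rest: shift past them
          rw [hdec]
          have hpad := firstFire_pad c L 0 (by omega) (by omega) (x :: r')
          simp only [zero_add] at hpad
          rw [hpad]
          simp only [firstFire, if_neg hx]
          have hlen : r'.length ≤ n := by
            rw [hdec] at hl
            simp at hl
            omega
          rw [ih r' hlen]
          rw [firstOcc_shift c x hx L h5 r']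
          simp only [Option.map_map]
          congr 1
          funext t
          simp only [Function.comp]
          omega
  exact key cs.length cs le_rfl

lemma scan_top (c : Char) (cs : List Char) :
    scanRun c cs 0 0 0 none =
      (maxRunFrom c 0 cs, (firstOcc c cs).map (fun (p : Nat) => (p : Int))) := by
  rw [scanRun_eq c cs 0 0 0 none le_rfl le_rfl]
  congr 1
  · rw [max_eq_right (le_maxRunFrom c cs 0)]
  · rw [Option.none_or, firstFire_eq_firstOcc]
    cases firstOcc c cs with
    | none => rfl
    | some p =>
      simp only [Option.map_some]
      congr 1
      push_cast
      omega

-- A's per-digit decision ('find 5 succeeds, find 6 fails') is B's 'longest run = 5';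
-- when it holds, A's find value is B's recorded hit.
lemma digit_core (c : Char) (cs : List Char) :
    ((maxRunFrom c 0 cs = 5) ↔
      (PySem.Chars.find cs (List.replicate 5 c) ≠ -1 ∧
       PySem.Chars.find cs (List.replicate 6 c) = -1)) ∧
    (maxRunFrom c 0 cs = 5 → ∃ p : Nat, firstOcc c cs = some p ∧
      PySem.Chars.find cs (List.replicate 5 c) = (p : Int)) := by
  constructor
  · rw [PySem.Chars.find_ne_neg_one_iff, PySem.Chars.find_eq_neg_one_iff,
      infix_iff_maxRun c 5 (by omega) cs, infix_iff_maxRun c 6 (by omega) cs]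
    constructor
    · intro h; constructor <;> omega
    · rintro ⟨h1, h2⟩; omega
  · intro h5
    have hinf : List.replicate 5 c <:+: cs := by
      rw [infix_iff_maxRun c 5 (by omega) cs]; omega
    cases hfo : firstOcc c cs with
    | none =>
      exfalso
      rw [← PySem.Chars.isIn_iff_infix, ← PySem.Chars.exists_prefix_drop_iff_isIn] at hinf
      obtain ⟨j, hj⟩ := hinf
      exact firstOcc_none c cs hfo j hj
    | some p =>
      refine ⟨p, rfl, ?_⟩
      rw [find_eq_firstOcc, hfo]
      rfl

lemma toList_ones5 : ("11111" : String).toList = ['1', '1', '1', '1', '1'] := by decide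
lemma toList_ones6 : ("111111" : String).toList = ['1', '1', '1', '1', '1', '1'] := by decide
lemma toList_twos5 : ("22222" : String).toList = ['2', '2', '2', '2', '2'] := by decide
lemma toList_twos6 : ("222222" : String).toList = ['2', '2', '2', '2', '2', '2'] := by decide

lemma go_eq : ∀ (lines : List String) (i : Int), find_c_go lines i = find_c_alt_go lines i := by
  intro lines
  induction lines with
  | nil => intro i; rfl
  | cons line rest ih =>
    intro i
    have b1 := digit_core '1' line.toList
    have b2 := digit_core '2' line.toList
    simp only [show (List.replicate 5 '1' : List Char) = ['1', '1', '1', '1', '1'] from rfl,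
      show (List.replicate 6 '1' : List Char) = ['1', '1', '1', '1', '1', '1'] from rfl,
      show (List.replicate 5 '2' : List Char) = ['2', '2', '2', '2', '2'] from rfl,
      show (List.replicate 6 '2' : List Char) = ['2', '2', '2', '2', '2', '2'] from rfl] at b1 b2
    simp only [find_c_go, find_c_alt_go, altDigits, scan_top, PySem.Str.find_eq,
      toList_ones5, toList_ones6, toList_twos5, toList_twos6]
    by_cases h1 : maxRunFrom '1' 0 line.toList = 5
    · obtain ⟨p, hp, hfind⟩ := b1.2 h1
      rw [if_pos (b1.1.1 h1),
        if_pos (show (maxRunFrom '1' 0 line.toList == 5) = true by simp [h1])]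
      simp [hp, hfind]
    · have hn1 : ¬ (PySem.Chars.find line.toList ['1', '1', '1', '1', '1'] ≠ -1 ∧
          PySem.Chars.find line.toList ['1', '1', '1', '1', '1', '1'] = -1) :=
        fun hc => h1 (b1.1.2 hc)
      rw [if_neg hn1, if_neg (show ¬ ((maxRunFrom '1' 0 line.toList == 5) = true) by simp [h1])]
      by_cases h2 : maxRunFrom '2' 0 line.toList = 5
      · obtain ⟨p, hp, hfind⟩ := b2.2 h2
        rw [if_pos (b2.1.1 h2),
          if_pos (show (maxRunFrom '2' 0 line.toList == 5) = true by simp [h2])]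
        simp [hp, hfind]
      · have hn2 : ¬ (PySem.Chars.find line.toList ['2', '2', '2', '2', '2'] ≠ -1 ∧
            PySem.Chars.find line.toList ['2', '2', '2', '2', '2', '2'] = -1) :=
          fun hc => h2 (b2.1.2 hc)
        rw [if_neg hn2,
          if_neg (show ¬ ((maxRunFrom '2' 0 line.toList == 5) = true) by simp [h2])]
        exact ih (i + 1)

-- ===== VERDICT (by name: the statement is the Claim_ definition above) =====
theorem find_c_spec : Claim_equal_find_c := by
  intro list _
  unfold Spec_find_c find_c find_c_alt
  exact go_eq list 0
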